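-- pv_equiv track=rewrite | github.com/pypi-data/pypi-mirror-374 | packages/stcrpy/stcrpy-1.0.5-py3-none-any.whl/stcrpy/tcr_processing/annotate.py | cleanup_scTCR_numbering
-- ===== SOURCE A (Python) =====
-- def cleanup_scTCR_numbering(numbering_dict, sequence_list):
--     """
--     The scTCR numbering method, while useful for sequences with two domains,
--     can have gaps in between (e.g. CD1 molecule of 4lhu).
--     This is to close the gaps in the numbering so that residues that were unnumbered by anarci don't move around
--     during structural parsing (when they're probably just connections between domains).
--
--     Args:
--         numbering_dict: numbered dictionary from align_scTCR_numbering
--         sequence_list : sequence list from the structure for alignment.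
--     """
--     positions = [p[0] for p in sequence_list]
--
--     # This gets the last numbered residue in numbering_dict
--     lastkey = max(numbering_dict)
--     lastidx = positions.index(lastkey)  # Where is this on sequence_list?
--
--     for index in range(1, len(positions)):
--
--         # If we got to the last key, don't bother.
--         if index > lastidx:
--             break
--
--         key = positions[index]
--
--         # If a target key is not in the numbering dict, see where it fits, then fit a number in it.
--         if key not in numbering_dict:
--
--             # Get the left and right bounds of the gap
--             left, right = False, False
--             lidx, ridx = 0, 0
--             lval = (0, " ")
--             j = 0
--
--             # Continue iterating left from the missing key until we find one that exists
--             while not left: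
--                 key_left = positions[index - j]
--                 if key_left in numbering_dict:
--                     left = True
--                     lidx = (
--                         index - j
--                     )  # Last known index of sequence_list where we know a key exists
--                     lval = numbering_dict[key_left]
--                 else:
--                     j += 1
--
--             j = 0
--             while not right:
--                 key_right = positions[index + j]
--                 if key_right in numbering_dict:
--                     right = True
--                     ridx = (
--                         index + j
--                     )  # Last known index of sequence_list on the right where we know a key exists
--                 else:
--                     j += 1
--
--             # For every key between the left and right, fill in
--             for k, missing_key in enumerate(positions[lidx + 1 : ridx]):
--                 numbering_dict[missing_key] = (lval[0] + k + 1, " ")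
--
--     return numbering_dict
-- ===== SOURCE B (Python) =====
-- def cleanup_scTCR_numbering(numbering_dict, sequence_list):
--     """One forward pass: track the last numbered position seen and the list of
--     unnumbered positions since it; when the next numbered position is reached,
--     fill the accumulated gap from the left bound's number."""
--     positions = [p[0] for p in sequence_list]
--     lastidx = positions.index(max(numbering_dict))
--
--     # Leading unnumbered positions are never filled; start at the first numbered one.
--     start = 0
--     while positions[start] not in numbering_dict:
--         start += 1
--
--     left_num = numbering_dict[positions[start]][0]
--     gap = []
--     for i in range(start + 1, lastidx + 1):
--         key = positions[i]
--         if key in numbering_dict: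
--             for k, missing_key in enumerate(gap):
--                 numbering_dict[missing_key] = (left_num + k + 1, " ")
--             gap = []
--             left_num = numbering_dict[key][0]
--         else:
--             gap.append(key)
--     return numbering_dict
-- ===== Notes on version B (the rewrite author's own statement) =====
-- stated objective: simpler
-- what changed: Replaces A's per-missing-key bidirectional while-loop rescans (left scan, right scan, then a slice re-fill for every gap) by a single forward pass that keeps the open gap and the last numbered residue's number in accumulators and flushes the gap when the next numbered residue is reached.
-- intended difference: On inputs whose first two sequence positions are unnumbered while the last position is numbered, A's left scan wraps around via a negative Python index and renumbers the leading residues upward from the LAST residue's number (e.g. {3:(5,' ')} with positions [1,2,3] becomes {3:(5,' '),1:(6,' '),2:(7,' ')}); B leaves the leading gap unfilled, the intended behaviour (A itself never fills a leading gap that starts at position 0). — e.g. on cleanup_scTCR_numbering([(3, 5, " ")], [(1, "A"), (2, "B"), (3, "C")]): A returns [(3, 5, " "), (1, 6, " "), (2, 7, " ")], B returns [(3, 5, " ")]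
-- outside the precondition, e.g. on cleanup_scTCR_numbering({}, [(1, 'A')]): A raises ValueError, B raises ValueError; on cleanup_scTCR_numbering({9: (1, ' ')}, [(1, 'A')]): A raises ValueError, B raises ValueError
import Mathlib
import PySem

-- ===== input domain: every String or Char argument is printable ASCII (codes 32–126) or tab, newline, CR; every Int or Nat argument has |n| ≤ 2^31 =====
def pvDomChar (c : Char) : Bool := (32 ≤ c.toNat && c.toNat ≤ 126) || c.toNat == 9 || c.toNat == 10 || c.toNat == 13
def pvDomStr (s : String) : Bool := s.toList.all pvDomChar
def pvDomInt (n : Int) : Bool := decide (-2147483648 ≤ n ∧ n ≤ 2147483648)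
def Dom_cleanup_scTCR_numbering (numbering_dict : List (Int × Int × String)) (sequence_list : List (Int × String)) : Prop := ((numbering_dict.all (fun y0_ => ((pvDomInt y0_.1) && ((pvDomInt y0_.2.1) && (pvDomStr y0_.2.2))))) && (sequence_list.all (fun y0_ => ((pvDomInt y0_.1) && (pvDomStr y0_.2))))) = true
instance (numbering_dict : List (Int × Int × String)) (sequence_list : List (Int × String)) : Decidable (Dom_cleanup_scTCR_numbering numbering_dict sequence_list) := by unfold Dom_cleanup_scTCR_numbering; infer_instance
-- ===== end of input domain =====

-- B replaces A's per-gap bidirectional (left/right) rescans by a single forward pass that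
-- keeps the open gap and its left bound in accumulators (objective: simpler/alternative).
-- Both functions mutate the Python dict in place; the equivalence proved here is about the
-- returned dictionary (ports return the dict's item list).

-- ===== PORT A =====
-- while not left: scan positions[index - j] for j = 0,1,2,… until a key in the dict is found
def pvALeftScan (d : PySem.Dict Int (Int × String)) (positions : List Int) (index : Int) : Int → Nat → Option (Int × Int × String)
  | _, 0 => none
  | j, fuel+1 =>
    match PySem.List.pyGet? positions (index - j) with
    | none => none          -- Python IndexError (unreachable under Pre_)
    | some keyLeft =>
      match d.get? keyLeft with
      | some v => some (index - j, v)
      | none => pvALeftScan d positions index (j + 1) fuel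

-- while not right: scan positions[index + j] for j = 0,1,2,… until a key in the dict is found
def pvARightScan (d : PySem.Dict Int (Int × String)) (positions : List Int) (index : Int) : Int → Nat → Option Int
  | _, 0 => none
  | j, fuel+1 =>
    match PySem.List.pyGet? positions (index + j) with
    | none => none          -- Python IndexError (unreachable under Pre_)
    | some keyRight =>
      if d.contains keyRight then some (index + j)
      else pvARightScan d positions index (j + 1) fuel

-- for k, missing_key in enumerate(positions[lidx+1:ridx]): numbering_dict[missing_key] = (lval[0]+k+1, " ")
def pvAFill (d : PySem.Dict Int (Int × String)) (lval0 : Int) (gap : List Int) : PySem.Dict Int (Int × String) :=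
  (PySem.List.enumerate gap).foldl (fun acc p => acc.insert p.2 (lval0 + p.1 + 1, " ")) d

-- one iteration of A's for-loop body (the part after the break test)
def pvAStep (positions : List Int) (d : PySem.Dict Int (Int × String)) (index : Nat) : PySem.Dict Int (Int × String) :=
  match PySem.List.pyGet? positions (index : Int) with
  | none => d
  | some key =>
    if d.contains key then d
    else
      match pvALeftScan d positions (index : Int) 0 (2 * positions.length + 2),
            pvARightScan d positions (index : Int) 0 (positions.length + 1) with
      | some (lidx, lval), some ridx =>
          pvAFill d lval.1 (PySem.List.slice positions (some (lidx + 1)) (some ridx))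
      | _, _ => d             -- Python would raise (unreachable under Pre_)

-- for index in range(1, len(positions)): if index > lastidx: break; …
def pvALoop (positions : List Int) (lastidx : Int) : Nat → Nat → PySem.Dict Int (Int × String) → PySem.Dict Int (Int × String)
  | _, 0, d => d
  | index, fuel+1, d =>
    if index < positions.length then
      if (index : Int) > lastidx then d
      else pvALoop positions lastidx (index + 1) fuel (pvAStep positions d index)
    else d

def cleanup_scTCR_numbering (numbering_dict : List (Int × Int × String)) (sequence_list : List (Int × String)) : List (Int × Int × String) :=
  let positions := sequence_list.map Prod.fst
  let d : PySem.Dict Int (Int × String) := PySem.Dict.ofList numbering_dict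
  let lastkey := (PySem.List.max? d.keys (fun k => k)).getD 0          -- max(numbering_dict); empty dict raises (excluded by Pre_)
  match PySem.List.index? positions lastkey with
  | none => d.items                                                    -- Python ValueError (excluded by Pre_)
  | some lastidx => (pvALoop positions (lastidx : Int) 1 positions.length d).items

-- ===== PORT B =====
-- while positions[start] not in numbering_dict: start += 1
def pvBStartScan (d : PySem.Dict Int (Int × String)) (positions : List Int) : Nat → Nat → Nat
  | s, 0 => s
  | s, fuel+1 =>
    match PySem.List.pyGet? positions (s : Int) with
    | none => s             -- Python IndexError (unreachable under Pre_)
    | some key => if d.contains key then s else pvBStartScan d positions (s + 1) fuel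

-- for k, missing_key in enumerate(gap): numbering_dict[missing_key] = (left_num+k+1, " ")
def pvBFill (d : PySem.Dict Int (Int × String)) (leftNum : Int) (gap : List Int) : PySem.Dict Int (Int × String) :=
  (PySem.List.enumerate gap).foldl (fun acc p => acc.insert p.2 (leftNum + p.1 + 1, " ")) d

-- for i in range(start+1, lastidx+1): … accumulate the open gap, flush it at each numbered key
def pvBLoop (positions : List Int) (d : PySem.Dict Int (Int × String)) (leftNum : Int) (gap : List Int) : List Int → PySem.Dict Int (Int × String)
  | [] => d
  | i :: rest =>
    match PySem.List.pyGet? positions i with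
    | none => d             -- Python IndexError (unreachable under Pre_)
    | some key =>
      if d.contains key then
        let d' := pvBFill d leftNum gap
        pvBLoop positions d' ((d'.getD key (0, " ")).1) [] rest
      else
        pvBLoop positions d leftNum (gap ++ [key]) rest

def cleanup_scTCR_numbering_alt (numbering_dict : List (Int × Int × String)) (sequence_list : List (Int × String)) : List (Int × Int × String) :=
  let positions := sequence_list.map Prod.fst
  let d : PySem.Dict Int (Int × String) := PySem.Dict.ofList numbering_dict
  let lastkey := (PySem.List.max? d.keys (fun k => k)).getD 0          -- max(numbering_dict); empty dict raises (excluded by Pre_)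
  match PySem.List.index? positions lastkey with
  | none => d.items                                                    -- Python ValueError (excluded by Pre_)
  | some lastidx =>
    let start := pvBStartScan d positions 0 (positions.length + 1)
    match PySem.List.pyGet? positions (start : Int) with
    | none => d.items                                                  -- Python IndexError (unreachable under Pre_)
    | some skey =>
      (pvBLoop positions d ((d.getD skey (0, " ")).1) []
        (PySem.List.pyRange ((start : Int) + 1) ((lastidx : Int) + 1) 1)).items

-- ===== PRECONDITION & SPEC =====
-- On inputs whose first two positions are unnumbered while the last position is numbered,
-- A's left scan wraps around via a negative Python index and renumbers the leading residues
-- upward from the LAST residue's number; B leaves the leading gap alone, which is the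
-- intended behaviour (A itself never fills a leading gap that starts at position 0).
def D_cleanup_scTCR_numbering (numbering_dict : List (Int × Int × String)) (sequence_list : List (Int × String)) : Prop :=
  2 ≤ sequence_list.length ∧
  (sequence_list.map Prod.fst).getD 0 0 ∉ numbering_dict.map Prod.fst ∧
  (sequence_list.map Prod.fst).getD 1 0 ∉ numbering_dict.map Prod.fst ∧
  (sequence_list.map Prod.fst).getD (sequence_list.length - 1) 0 ∈ numbering_dict.map Prod.fst

instance (numbering_dict : List (Int × Int × String)) (sequence_list : List (Int × String)) : Decidable (D_cleanup_scTCR_numbering numbering_dict sequence_list) := by unfold D_cleanup_scTCR_numbering; infer_instance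

-- Pre_ excludes the inputs on which A raises ValueError (empty numbering_dict, or largest
-- key absent from the positions), and, only inside the wrap-around region D_, inputs with
-- duplicate position ids, where numeric coincidences between A's accidental wrap fill and
-- B's ordinary fills make the corner unmatchable either way.
def Pre_cleanup_scTCR_numbering (numbering_dict : List (Int × Int × String)) (sequence_list : List (Int × String)) : Prop :=
  numbering_dict ≠ [] ∧
  (PySem.List.max? (numbering_dict.map Prod.fst) (fun k => k)).getD 0 ∈ sequence_list.map Prod.fst ∧
  (D_cleanup_scTCR_numbering numbering_dict sequence_list → (sequence_list.map Prod.fst).Nodup)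

instance (numbering_dict : List (Int × Int × String)) (sequence_list : List (Int × String)) : Decidable (Pre_cleanup_scTCR_numbering numbering_dict sequence_list) := by unfold Pre_cleanup_scTCR_numbering; infer_instance

def pvWitness_cleanup_scTCR_numbering : (List (Int × Int × String)) × (List (Int × String)) :=
  ([(1, 0, " "), (3, 5, " ")], [(1, "A"), (2, "B"), (3, "C")])

def Spec_cleanup_scTCR_numbering (numbering_dict : List (Int × Int × String)) (sequence_list : List (Int × String)) (out : List (Int × Int × String)) : Prop :=
  ¬ D_cleanup_scTCR_numbering numbering_dict sequence_list → out = cleanup_scTCR_numbering_alt numbering_dict sequence_list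

instance (numbering_dict : List (Int × Int × String)) (sequence_list : List (Int × String)) (out : List (Int × Int × String)) : Decidable (Spec_cleanup_scTCR_numbering numbering_dict sequence_list out) := by unfold Spec_cleanup_scTCR_numbering; infer_instance

def pvDiffWitness_cleanup_scTCR_numbering : (List (Int × Int × String)) × (List (Int × String)) :=
  ([(3, 5, " ")], [(1, "A"), (2, "B"), (3, "C")])

def pvDiffWitnessOut_cleanup_scTCR_numbering : (List (Int × Int × String)) × (List (Int × Int × String)) :=
  ([(3, 5, " "), (1, 6, " "), (2, 7, " ")], [(3, 5, " ")])

-- ===== CLAIM =====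
def Claim_unchanged_cleanup_scTCR_numbering : Prop := ∀ (numbering_dict : List (Int × Int × String)) (sequence_list : List (Int × String)), Dom_cleanup_scTCR_numbering numbering_dict sequence_list → Pre_cleanup_scTCR_numbering numbering_dict sequence_list → Spec_cleanup_scTCR_numbering numbering_dict sequence_list (cleanup_scTCR_numbering numbering_dict sequence_list)
def Claim_changed_cleanup_scTCR_numbering : Prop := Dom_cleanup_scTCR_numbering (pvDiffWitness_cleanup_scTCR_numbering.1) (pvDiffWitness_cleanup_scTCR_numbering.2) ∧ Pre_cleanup_scTCR_numbering (pvDiffWitness_cleanup_scTCR_numbering.1) (pvDiffWitness_cleanup_scTCR_numbering.2) ∧ D_cleanup_scTCR_numbering (pvDiffWitness_cleanup_scTCR_numbering.1) (pvDiffWitness_cleanup_scTCR_numbering.2) ∧ cleanup_scTCR_numbering (pvDiffWitness_cleanup_scTCR_numbering.1) (pvDiffWitness_cleanup_scTCR_numbering.2) = pvDiffWitnessOut_cleanup_scTCR_numbering.1 ∧ cleanup_scTCR_numbering_alt (pvDiffWitness_cleanup_scTCR_numbering.1) (pvDiffWitness_cleanup_scTCR_numbering.2) = pvDiffWitnessOut_cleanup_scTCR_numbering.2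 ∧ pvDiffWitnessOut_cleanup_scTCR_numbering.1 ≠ pvDiffWitnessOut_cleanup_scTCR_numbering.2

def Claim_exact_cleanup_scTCR_numbering : Prop := ∀ (numbering_dict : List (Int × Int × String)) (sequence_list : List (Int × String)), Dom_cleanup_scTCR_numbering numbering_dict sequence_list → Pre_cleanup_scTCR_numbering numbering_dict sequence_list → D_cleanup_scTCR_numbering numbering_dict sequence_list → cleanup_scTCR_numbering numbering_dict sequence_list ≠ cleanup_scTCR_numbering_alt numbering_dict sequence_list

-- ===== LEMMAS AND PROOFS =====

-- Python indexing helper: a valid (possibly negative) index reads the list at its wrapped position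
theorem pv_getD_nat (pos : List Int) (j : Nat) (h : j < pos.length) : pos.getD j 0 = pos[j] := by
  rw [List.getD_eq_getElem?_getD, List.getElem?_eq_getElem h]; rfl

theorem pv_pyGet?_nat (pos : List Int) (t : Nat) (h : t < pos.length) :
    PySem.List.pyGet? pos (t : Int) = some (pos.getD t 0) := by
  rw [PySem.List.pyGet?_natCast, List.getElem?_eq_getElem h, pv_getD_nat pos t h]

theorem pv_pyGet?_idx (pos : List Int) (t : Int) (h1 : -(pos.length : Int) ≤ t) (h2 : t < pos.length) :
    PySem.List.pyGet? pos t = some (pos.getD (if 0 ≤ t then t.toNat else (t + pos.length).toNat) 0) := by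
  by_cases ht : 0 ≤ t
  · rw [if_pos ht]
    have hlt : t.toNat < pos.length := by omega
    rw [PySem.List.pyGet?_of_nonneg pos ht, List.getElem?_eq_getElem hlt, pv_getD_nat pos _ hlt]
  · rw [if_neg ht]
    obtain ⟨m, hm1, hm2, hmt⟩ : ∃ m : Nat, 0 < m ∧ m ≤ pos.length ∧ t = -(m : Int) :=
      ⟨(-t).toNat, by omega, by omega, by omega⟩
    subst hmt
    have hlt : pos.length - m < pos.length := by omega
    have harg : (-(m : Int) + pos.length).toNat = pos.length - m := by omega
    rw [PySem.List.pyGet?_neg_natCast _ _ hm1 hm2, List.getElem?_eq_getElem hlt, harg,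
      pv_getD_nat pos _ hlt]

-- left-scan specification: first hit scanning j = jstart, jstart+1, …
theorem pvALeftScan_spec (d : PySem.Dict Int (Int × String)) (pos : List Int) (i : Int) :
    ∀ (fuel : Nat) (j jstop : Int) (khit : Int) (v : Int × String),
    j ≤ jstop →
    (∀ j', j ≤ j' → j' < jstop → ∃ k, PySem.List.pyGet? pos (i - j') = some k ∧ d.get? k = none) →
    PySem.List.pyGet? pos (i - jstop) = some khit →
    d.get? khit = some v →
    jstop - j < fuel →
    pvALeftScan d pos i j fuel = some (i - jstop, v) := by
  intro fuel
  induction fuel with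
  | zero => intro j jstop khit v hj _ _ _ hfuel; omega
  | succ f ih =>
    intro j jstop khit v hj hmiss hhit hv hfuel
    by_cases hej : j = jstop
    · subst hej
      simp [pvALeftScan, hhit, hv]
    · have hlt : j < jstop := lt_of_le_of_ne hj hej
      obtain ⟨k, hk, hk0⟩ := hmiss j le_rfl hlt
      simp only [pvALeftScan, hk, hk0]
      exact ih (j + 1) jstop khit v (by omega) (fun j' h1 h2 => hmiss j' (by omega) h2) hhit hv (by omega)

-- right-scan specification
theorem pvARightScan_spec (d : PySem.Dict Int (Int × String)) (pos : List Int) (i : Int) :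
    ∀ (fuel : Nat) (j jstop : Int) (khit : Int),
    j ≤ jstop →
    (∀ j', j ≤ j' → j' < jstop → ∃ k, PySem.List.pyGet? pos (i + j') = some k ∧ d.contains k = false) →
    PySem.List.pyGet? pos (i + jstop) = some khit →
    d.contains khit = true →
    jstop - j < fuel →
    pvARightScan d pos i j fuel = some (i + jstop) := by
  intro fuel
  induction fuel with
  | zero => intro j jstop khit hj _ _ _ hfuel; omega
  | succ f ih =>
    intro j jstop khit hj hmiss hhit hv hfuel
    by_cases hej : j = jstop
    · subst hej
      simp [pvARightScan, hhit, hv]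
    · have hlt : j < jstop := lt_of_le_of_ne hj hej
      obtain ⟨k, hk, hk0⟩ := hmiss j le_rfl hlt
      simp only [pvARightScan, hk, hk0, Bool.false_eq_true, if_false]
      exact ih (j + 1) jstop khit (by omega) (fun j' h1 h2 => hmiss j' (by omega) h2) hhit hv (by omega)

-- B's start-scan specification
theorem pvBStartScan_spec (d : PySem.Dict Int (Int × String)) (pos : List Int) :
    ∀ (fuel s sstop : Nat) (khit : Int),
    s ≤ sstop →
    (∀ t, s ≤ t → t < sstop → ∃ k, PySem.List.pyGet? pos (t : Int) = some k ∧ d.contains k = false) →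
    PySem.List.pyGet? pos (sstop : Int) = some khit →
    d.contains khit = true →
    sstop - s < fuel →
    pvBStartScan d pos s fuel = sstop := by
  intro fuel
  induction fuel with
  | zero => intro s sstop khit hs _ _ _ hfuel; omega
  | succ f ih =>
    intro s sstop khit hs hmiss hhit hv hfuel
    by_cases hes : s = sstop
    · subst hes
      simp [pvBStartScan, hhit, hv]
    · have hlt : s < sstop := lt_of_le_of_ne hs hes
      obtain ⟨k, hk, hk0⟩ := hmiss s le_rfl hlt
      simp only [pvBStartScan, hk, hk0, Bool.false_eq_true, if_false]
      exact ih (s + 1) sstop khit (by omega) (fun t h1 h2 => hmiss t (by omega) h2) hhit hv (by omega)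

-- the two fill loops are the same function
theorem pvBFill_eq_pvAFill (d : PySem.Dict Int (Int × String)) (l : Int) (g : List Int) :
    pvBFill d l g = pvAFill d l g := rfl

theorem pvAFill_nil (d : PySem.Dict Int (Int × String)) (l : Int) : pvAFill d l [] = d := rfl

-- keys after the fill
theorem pvFill_aux_keys (lval0 : Int) :
    ∀ (g : List Int) (s : Int) (d : PySem.Dict Int (Int × String)),
    ((PySem.List.enumerate g s).foldl (fun acc p => acc.insert p.2 (lval0 + p.1 + 1, " ")) d).keys
      = PySem.Set.update d.keys g := by
  intro g
  induction g with
  | nil => intro s d; simp [PySem.List.enumerate, PySem.Set.update_nil]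
  | cons x xs ih =>
    intro s d
    rw [PySem.List.enumerate_cons]
    simp only [List.foldl_cons]
    rw [ih (s + 1)]
    rw [PySem.Set.update_cons]
    congr 1
    by_cases hc : d.contains x = true
    · rw [PySem.Dict.keys_insert_of_contains d _ hc,
        PySem.Set.add_of_mem ((PySem.Dict.contains_iff_mem_keys d x).1 hc)]
    · have hc' : d.contains x = false := by
        cases h : d.contains x
        · rfl
        · exact absurd h hc
      rw [PySem.Dict.keys_insert_of_not_contains d _ hc',
        PySem.Set.add_of_not_mem (fun hm => hc ((PySem.Dict.contains_iff_mem_keys d x).2 hm))]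

theorem pvAFill_keys (d : PySem.Dict Int (Int × String)) (l : Int) (g : List Int) :
    (pvAFill d l g).keys = PySem.Set.update d.keys g := pvFill_aux_keys l g 0 d

theorem pvAFill_mem_keys (d : PySem.Dict Int (Int × String)) (l : Int) (g : List Int) (q : Int) :
    q ∈ (pvAFill d l g).keys ↔ q ∈ d.keys ∨ q ∈ g := by
  rw [pvAFill_keys]; exact PySem.Set.mem_update _ _ _

-- membership in a contiguous window of the list
theorem pv_mem_take_drop (pos : List Int) (i r j : Nat) (hij : i ≤ j) (hjr : j < r)
    (hr : r ≤ pos.length) : pos.getD j 0 ∈ (pos.drop i).take (r - i) := by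
  have hj : j < pos.length := by omega
  have hlen : ((pos.drop i).take (r - i)).length = r - i := by
    simp [List.length_take, List.length_drop]; omega
  rw [List.mem_iff_getElem]
  refine ⟨j - i, by omega, ?_⟩
  rw [List.getElem_take, List.getElem_drop]
  rw [List.getD_eq_getElem pos 0 hj]
  congr 1
  omega

-- append one element to the accumulated gap
theorem pv_take_snoc (pos : List Int) (i t : Nat) (hit : i ≤ t) (ht : t < pos.length) :
    (pos.drop i).take (t - i) ++ [pos.getD t 0] = (pos.drop i).take (t + 1 - i) := by
  have he : t + 1 - i = (t - i) + 1 := by omega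
  rw [he, List.take_add_one]
  congr 1
  rw [List.getElem?_drop]
  have hi : i + (t - i) = t := by omega
  rw [hi, List.getElem?_eq_getElem ht, pv_getD_nat pos t ht]
  rfl

-- A's loop: one step / termination
theorem pvALoop_step (pos : List Int) (L : Int) (i f : Nat) (d : PySem.Dict Int (Int × String))
    (h1 : i < pos.length) (h2 : (i : Int) ≤ L) :
    pvALoop pos L i (f + 1) d = pvALoop pos L (i + 1) f (pvAStep pos d i) := by
  simp [pvALoop, h1, not_lt.2 h2]

theorem pvALoop_base (pos : List Int) (L : Nat) (i f : Nat) (d : PySem.Dict Int (Int × String))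
    (h : L < i) : pvALoop pos (L : Int) i f d = d := by
  cases f with
  | zero => rfl
  | succ f =>
    simp only [pvALoop]
    split_ifs with h1 h2
    · rfl
    · exfalso; push_cast at h2; omega
    · rfl

-- A's loop body: key already numbered → nothing happens
theorem pvAStep_skip (pos : List Int) (d : PySem.Dict Int (Int × String)) (i : Nat)
    (hi : i < pos.length) (hc : pos.getD i 0 ∈ d.keys) : pvAStep pos d i = d := by
  have hct : d.contains (pos.getD i 0) = true := (PySem.Dict.contains_iff_mem_keys d _).2 hc
  simp only [pvAStep, pv_pyGet?_nat pos i hi, hct, if_true]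

-- A's loop body at the first missing key of an interior gap
theorem pvAStep_gap (pos : List Int) (d : PySem.Dict Int (Int × String)) (i r : Nat)
    (hi1 : 1 ≤ i) (hir : i < r) (hr : r < pos.length)
    (hmiss : ∀ j, i ≤ j → j < r → pos.getD j 0 ∉ d.keys)
    (hrmem : pos.getD r 0 ∈ d.keys)
    (v : Int × String) (hv : d.get? (pos.getD (i - 1) 0) = some v) :
    pvAStep pos d i = pvAFill d v.1 ((pos.drop i).take (r - i)) := by
  have hi : i < pos.length := by omega
  have hgi : PySem.List.pyGet? pos (i : Int) = some (pos.getD i 0) := pv_pyGet?_nat pos i hi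
  have hcf : d.contains (pos.getD i 0) = false := by
    cases h : d.contains (pos.getD i 0)
    · rfl
    · exact absurd ((PySem.Dict.contains_iff_mem_keys d _).1 h) (hmiss i le_rfl hir)
  have hgl : PySem.List.pyGet? pos ((i : Int) - 1) = some (pos.getD (i - 1) 0) := by
    have he : (i : Int) - 1 = ((i - 1 : Nat) : Int) := by omega
    rw [he]; exact pv_pyGet?_nat pos (i - 1) (by omega)
  have hleft : pvALeftScan d pos (i : Int) 0 (2 * pos.length + 2) = some ((i : Int) - 1, v) := by
    apply pvALeftScan_spec d pos (i : Int) _ 0 1 (pos.getD (i - 1) 0) v (by omega) ?_ hgl hv (by omega)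
    intro j' h1 h2
    have hj0 : j' = 0 := by omega
    subst hj0
    refine ⟨pos.getD i 0, by simpa using hgi, ?_⟩
    rw [PySem.Dict.get?_eq_none_iff_not_mem_keys]
    exact hmiss i le_rfl hir
  have hgr : PySem.List.pyGet? pos ((i : Int) + ((r - i : Nat) : Int)) = some (pos.getD r 0) := by
    have he : (i : Int) + ((r - i : Nat) : Int) = ((r : Nat) : Int) := by omega
    rw [he]; exact pv_pyGet?_nat pos r hr
  have hright : pvARightScan d pos (i : Int) 0 (pos.length + 1) = some ((i : Int) + ((r - i : Nat) : Int)) := by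
    apply pvARightScan_spec d pos (i : Int) _ 0 ((r - i : Nat) : Int) (pos.getD r 0) (by omega) ?_ hgr
      ((PySem.Dict.contains_iff_mem_keys d _).2 hrmem) (by omega)
    intro j' h1 h2
    have hj : i + j'.toNat < r := by omega
    have he : (i : Int) + j' = ((i + j'.toNat : Nat) : Int) := by omega
    refine ⟨pos.getD (i + j'.toNat) 0, by rw [he]; exact pv_pyGet?_nat pos _ (by omega), ?_⟩
    cases h : d.contains (pos.getD (i + j'.toNat) 0)
    · rfl
    · exact absurd ((PySem.Dict.contains_iff_mem_keys d _).1 h) (hmiss _ (by omega) hj)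
  simp only [pvAStep, hgi, hcf, Bool.false_eq_true, if_false, hleft, hright]
  have he1 : (i : Int) - 1 + 1 = ((i : Nat) : Int) := by omega
  have he2 : (i : Int) + ((r - i : Nat) : Int) = ((r : Nat) : Int) := by omega
  rw [he1, he2, PySem.List.slice_natCast]

-- A's loop body on a fully missing prefix (the wrap-around case, empty fill)
theorem pvAStep_wrap (pos : List Int) (d : PySem.Dict Int (Int × String)) (i r k : Nat)
    (hi1 : 1 ≤ i) (hir : i < r) (hrn : r < pos.length)
    (hprefix : ∀ j, j ≤ i → j < pos.length → pos.getD j 0 ∉ d.keys)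
    (hmiss : ∀ j, i ≤ j → j < r → pos.getD j 0 ∉ d.keys)
    (hrmem : pos.getD r 0 ∈ d.keys)
    (hkmem : pos.getD k 0 ∈ d.keys)
    (hkmax : ∀ j, k < j → j < pos.length → pos.getD j 0 ∉ d.keys)
    (hklast : k + 1 < pos.length)
    (hrk : r ≤ k) :
    pvAStep pos d i = d := by
  have hi : i < pos.length := by omega
  have hk : k < pos.length := by omega
  have hgi : PySem.List.pyGet? pos (i : Int) = some (pos.getD i 0) := pv_pyGet?_nat pos i hi
  have hcf : d.contains (pos.getD i 0) = false := by
    cases h : d.contains (pos.getD i 0)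
    · rfl
    · exact absurd ((PySem.Dict.contains_iff_mem_keys d _).1 h) (hprefix i le_rfl hi)
  -- left scan wraps to the last present index k (as Python index k - n)
  have hvk : ∃ v, d.get? (pos.getD k 0) = some v := by
    have := (PySem.Dict.contains_iff_mem_keys d _).2 hkmem
    rw [PySem.Dict.contains_eq_isSome_get?] at this
    exact Option.isSome_iff_exists.1 this
  obtain ⟨v, hv⟩ := hvk
  have hc1 : ((pos.length - k : Nat) : Int) = (pos.length : Int) - (k : Int) :=
    Nat.cast_sub (le_of_lt hk)
  have hghit : PySem.List.pyGet? pos ((i : Int) - ((i : Int) + (pos.length : Int) - (k : Int))) = some (pos.getD k 0) := by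
    have he : (i : Int) - ((i : Int) + (pos.length : Int) - (k : Int)) = -(((pos.length - k : Nat)) : Int) := by
      rw [hc1]; ring
    rw [he, PySem.List.pyGet?_neg_natCast pos _ (by omega) (by omega)]
    have harg : pos.length - (pos.length - k) = k := by omega
    rw [harg, List.getElem?_eq_getElem hk, pv_getD_nat pos k hk]
  have hleft : pvALeftScan d pos (i : Int) 0 (2 * pos.length + 2)
      = some ((i : Int) - ((i : Int) + (pos.length : Int) - (k : Int)), v) := by
    apply pvALeftScan_spec d pos (i : Int) _ 0 ((i : Int) + (pos.length : Int) - (k : Int))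
      (pos.getD k 0) v (by omega) ?_ hghit hv (by omega)
    intro j' h1 h2
    have hrange1 : -(pos.length : Int) ≤ (i : Int) - j' := by omega
    have hrange2 : (i : Int) - j' < pos.length := by omega
    refine ⟨_, pv_pyGet?_idx pos ((i : Int) - j') hrange1 hrange2, ?_⟩
    rw [PySem.Dict.get?_eq_none_iff_not_mem_keys]
    by_cases hpos : 0 ≤ (i : Int) - j'
    · rw [if_pos hpos]
      exact hprefix ((i : Int) - j').toNat (by omega) (by omega)
    · rw [if_neg hpos]
      apply hkmax
      · omega
      · omega
  -- right scan finds r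
  have hgr : PySem.List.pyGet? pos ((i : Int) + ((r - i : Nat) : Int)) = some (pos.getD r 0) := by
    have he : (i : Int) + ((r - i : Nat) : Int) = ((r : Nat) : Int) := by omega
    rw [he]; exact pv_pyGet?_nat pos r hrn
  have hright : pvARightScan d pos (i : Int) 0 (pos.length + 1) = some ((i : Int) + ((r - i : Nat) : Int)) := by
    apply pvARightScan_spec d pos (i : Int) _ 0 ((r - i : Nat) : Int) (pos.getD r 0) (by omega) ?_ hgr
      ((PySem.Dict.contains_iff_mem_keys d _).2 hrmem) (by omega)
    intro j' h1 h2
    have hj : i + j'.toNat < r := by omega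
    have he : (i : Int) + j' = ((i + j'.toNat : Nat) : Int) := by omega
    refine ⟨pos.getD (i + j'.toNat) 0, by rw [he]; exact pv_pyGet?_nat pos _ (by omega), ?_⟩
    cases h : d.contains (pos.getD (i + j'.toNat) 0)
    · rfl
    · exact absurd ((PySem.Dict.contains_iff_mem_keys d _).1 h) (hmiss _ (by omega) hj)
  simp only [pvAStep, hgi, hcf, Bool.false_eq_true, if_false, hleft, hright]
  -- the slice positions[k-n+1 : r] is empty
  have hsl : PySem.List.slice pos (some ((i : Int) - ((i : Int) + (pos.length : Int) - (k : Int)) + 1))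
      (some ((i : Int) + ((r - i : Nat) : Int))) = ([] : List Int) := by
    apply List.eq_nil_of_length_eq_zero
    rw [PySem.List.length_slice]
    have hc2 : ((pos.length - (k + 1) : Nat) : Int) = (pos.length : Int) - (k : Int) - 1 := by
      rw [Nat.cast_sub hklast.le]; push_cast; ring
    have he1 : (i : Int) - ((i : Int) + (pos.length : Int) - (k : Int)) + 1
        = -((pos.length - (k + 1) : Nat) : Int) := by
      rw [hc2]; ring
    have he2 : (i : Int) + ((r - i : Nat) : Int) = ((r : Nat) : Int) := by omega
    rw [he1, he2, PySem.List.clampIdx_neg_natCast _ _ (by omega), PySem.List.clampIdx_natCast]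
    omega
  rw [hsl, pvAFill_nil]

-- B's loop: one unfolding on a numbered key
theorem pvBLoop_cons_hit (pos : List Int) (d : PySem.Dict Int (Int × String)) (lN : Int)
    (gap : List Int) (t : Nat) (rest : List Int) (ht : t < pos.length)
    (hc : pos.getD t 0 ∈ d.keys) :
    pvBLoop pos d lN gap ((t : Int) :: rest)
      = pvBLoop pos (pvBFill d lN gap) (((pvBFill d lN gap).getD (pos.getD t 0) (0, " ")).1) [] rest := by
  have hct : d.contains (pos.getD t 0) = true := (PySem.Dict.contains_iff_mem_keys d _).2 hc
  simp only [pvBLoop, pv_pyGet?_nat pos t ht, hct, if_true]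

theorem pvBLoop_cons_miss (pos : List Int) (d : PySem.Dict Int (Int × String)) (lN : Int)
    (gap : List Int) (t : Nat) (rest : List Int) (ht : t < pos.length)
    (hc : pos.getD t 0 ∉ d.keys) :
    pvBLoop pos d lN gap ((t : Int) :: rest) = pvBLoop pos d lN (gap ++ [pos.getD t 0]) rest := by
  have hcf : d.contains (pos.getD t 0) = false := by
    cases h : d.contains (pos.getD t 0)
    · rfl
    · exact absurd ((PySem.Dict.contains_iff_mem_keys d _).1 h) hc
  simp only [pvBLoop, pv_pyGet?_nat pos t ht, hcf, Bool.false_eq_true, if_false]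

-- the main simulation: from any aligned index, A's loop and B's loop produce the same dict
theorem pvMain (pos : List Int) (L start : Nat) (hLn : L < pos.length) :
    ∀ (m : Nat), ∀ (i : Nat) (d : PySem.Dict Int (Int × String)) (leftNum : Int) (fuelA : Nat),
    L + 1 - i ≤ m → start + 1 ≤ i → i ≤ L + 1 → pos.length - i < fuelA →
    (∀ j, start ≤ j → j < i → pos.getD j 0 ∈ d.keys) →
    pos.getD L 0 ∈ d.keys →
    leftNum = (d.getD (pos.getD (i - 1) 0) (0, " ")).1 →
    pvALoop pos (L : Int) i fuelA d = pvBLoop pos d leftNum [] (PySem.List.pyRange (i : Int) ((L : Int) + 1) 1) := by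
  intro m
  induction m with
  | zero =>
    intro i d leftNum fuelA hm h1 h2 hfuel _ _ _
    have hi : i = L + 1 := by omega
    subst hi
    rw [pvALoop_base pos L (L + 1) fuelA d (by omega),
      PySem.List.pyRange_one_eq_nil (by push_cast; omega)]
    rfl
  | succ m ihm =>
    intro i d leftNum fuelA hm h1 h2 hfuel hI2 hLd hlN
    by_cases hiL : i = L + 1
    · subst hiL
      rw [pvALoop_base pos L (L + 1) fuelA d (by omega),
        PySem.List.pyRange_one_eq_nil (by push_cast; omega)]
      rfl
    · have hiL' : i ≤ L := by omega
      have hin : i < pos.length := by omega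
      obtain ⟨fA, rfl⟩ : ∃ fA, fuelA = fA + 1 := ⟨fuelA - 1, by omega⟩
      have hrange : PySem.List.pyRange (i : Int) ((L : Int) + 1) 1
          = (i : Int) :: PySem.List.pyRange ((i : Int) + 1) ((L : Int) + 1) 1 :=
        PySem.List.pyRange_one_cons (by push_cast; omega)
      have hcast : ((i : Int) + 1) = (((i + 1 : Nat)) : Int) := by push_cast; ring
      by_cases hmem : pos.getD i 0 ∈ d.keys
      · -- already numbered: both sides skip
        rw [pvALoop_step pos (L : Int) i fA d hin (by push_cast; omega),
          pvAStep_skip pos d i hin hmem, hrange,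
          pvBLoop_cons_hit pos d leftNum [] i _ hin hmem]
        rw [show pvBFill d leftNum [] = d from rfl, hcast]
        apply ihm (i + 1) d _ fA (by omega) (by omega) (by omega) (by omega)
        · intro j hj1 hj2
          by_cases hje : j = i
          · subst hje; exact hmem
          · exact hI2 j hj1 (by omega)
        · exact hLd
        · simp
      · -- first missing key of a gap
        have hex : ∃ t, pos.getD (i + t) 0 ∈ d.keys ∧ i + t < pos.length := by
          refine ⟨L - i, ?_, by omega⟩
          have he : i + (L - i) = L := by omega
          rw [he]
          exact hLd
        set T := Nat.find hex with hT
        set r := i + T with hrdef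
        have hrP : pos.getD r 0 ∈ d.keys ∧ r < pos.length := Nat.find_spec hex
        have hrmin : ∀ t', t' < T → ¬(pos.getD (i + t') 0 ∈ d.keys ∧ i + t' < pos.length) :=
          fun t' ht' => Nat.find_min hex ht'
        have hTle : T ≤ L - i := Nat.find_min' hex (by
          refine ⟨?_, by omega⟩
          have he : i + (L - i) = L := by omega
          rw [he]
          exact hLd)
        have hT0 : 0 < T := by
          rcases Nat.eq_zero_or_pos T with h0 | h0
          · exfalso
            apply hmem
            have := hrP.1
            rw [hrdef, h0] at this
            simpa using this
          · exact h0
        have hrL : r ≤ L := by omega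
        have hrn : r < pos.length := by omega
        have hmiss : ∀ j, i ≤ j → j < r → pos.getD j 0 ∉ d.keys := by
          intro j hj1 hj2 hjm
          exact hrmin (j - i) (by omega) (by
            have he : i + (j - i) = j := by omega
            rw [he]
            exact ⟨hjm, by omega⟩)
        have hlmem : pos.getD (i - 1) 0 ∈ d.keys := hI2 (i - 1) (by omega) (by omega)
        have hvex : ∃ v, d.get? (pos.getD (i - 1) 0) = some v := by
          have := (PySem.Dict.contains_iff_mem_keys d _).2 hlmem
          rw [PySem.Dict.contains_eq_isSome_get?] at this
          exact Option.isSome_iff_exists.1 this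
        obtain ⟨v, hv⟩ := hvex
        have hlNv : leftNum = v.1 := by
          rw [hlN, PySem.Dict.getD_eq_get?_getD, hv]
          rfl
        set g : List Int := (pos.drop i).take (r - i) with hgdef
        set dA : PySem.Dict Int (Int × String) := pvAFill d v.1 g with hdA
        have hstepA : pvAStep pos d i = dA := pvAStep_gap pos d i r (by omega) (by omega) hrn hmiss hrP.1 v hv
        -- invariant facts about the filled dict
        have hdALd : pos.getD L 0 ∈ dA.keys := by
          rw [hdA, pvAFill_mem_keys]
          exact Or.inl hLd
        have hdAI2 : ∀ j, start ≤ j → j < r + 1 → pos.getD j 0 ∈ dA.keys := by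
          intro j hj1 hj2
          rw [hdA, pvAFill_mem_keys]
          by_cases hja : j < i
          · exact Or.inl (hI2 j hj1 hja)
          · by_cases hjb : j < r
            · exact Or.inr (pv_mem_take_drop pos i r j (by omega) hjb (by omega))
            · have hje : j = r := by omega
              subst hje
              exact Or.inl hrP.1
        -- walk the rest of the gap: A skips filled keys while B accumulates them
        have gapwalk : ∀ (kk : Nat), ∀ (t fuel : Nat), r - t = kk → i + 1 ≤ t → t ≤ r →
            pos.length - t < fuel →
            pvALoop pos (L : Int) t fuel dA
              = pvBLoop pos d leftNum ((pos.drop i).take (t - i))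
                  (PySem.List.pyRange (t : Int) ((L : Int) + 1) 1) := by
          intro kk
          induction kk with
          | zero =>
            intro t fuel hkk ht1 ht2 hfu
            have hte : t = r := by omega
            subst hte
            obtain ⟨fu, rfl⟩ : ∃ fu, fuel = fu + 1 := ⟨fuel - 1, by omega⟩
            have hrmemA : pos.getD r 0 ∈ dA.keys := hdAI2 r (by omega) (by omega)
            rw [pvALoop_step pos (L : Int) r fu dA hrn (by push_cast; omega),
              pvAStep_skip pos dA r hrn hrmemA]
            rw [PySem.List.pyRange_one_cons (by push_cast; omega),
              pvBLoop_cons_hit pos d leftNum _ r _ hrn hrP.1]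
            rw [pvBFill_eq_pvAFill, hlNv, ← hgdef, ← hdA]
            rw [show ((r : Int) + 1) = (((r + 1 : Nat)) : Int) by push_cast; ring]
            apply ihm (r + 1) dA _ fu (by omega) (by omega) (by omega) (by omega) hdAI2 hdALd
            simp
          | succ kk ihk =>
            intro t fuel hkk ht1 ht2 hfu
            have htr : t < r := by omega
            have htn : t < pos.length := by omega
            obtain ⟨fu, rfl⟩ : ∃ fu, fuel = fu + 1 := ⟨fuel - 1, by omega⟩
            have htg : pos.getD t 0 ∈ dA.keys := hdAI2 t (by omega) (by omega)
            have htd : pos.getD t 0 ∉ d.keys := hmiss t (by omega) htr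
            rw [pvALoop_step pos (L : Int) t fu dA htn (by push_cast; omega),
              pvAStep_skip pos dA t htn htg]
            rw [PySem.List.pyRange_one_cons (by push_cast; omega),
              pvBLoop_cons_miss pos d leftNum _ t _ htn htd]
            rw [pv_take_snoc pos i t (by omega) htn]
            rw [show ((t : Int) + 1) = (((t + 1 : Nat)) : Int) by push_cast; ring]
            exact ihk (t + 1) fu (by omega) (by omega) (by omega) (by omega)
        -- assemble the first step of the gap
        rw [pvALoop_step pos (L : Int) i fA d hin (by push_cast; omega), hstepA, hrange,
          pvBLoop_cons_miss pos d leftNum [] i _ hin hmem]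
        have hone : ([] : List Int) ++ [pos.getD i 0] = (pos.drop i).take (i + 1 - i) := by
          rw [← pv_take_snoc pos i i le_rfl hin]
          simp
        rw [hone, hcast]
        exact gapwalk (r - (i + 1)) (i + 1) fA rfl le_rfl (by omega) (by omega)

-- phase 1: A's iterations over the (never filled) leading gap leave the dict unchanged
theorem pvPhase1 (pos : List Int) (d0 : PySem.Dict Int (Int × String)) (L start : Nat)
    (hLn : L < pos.length) (hstartL : start ≤ L)
    (hsmin : ∀ j, j < start → pos.getD j 0 ∉ d0.keys)
    (hsmem : pos.getD start 0 ∈ d0.keys)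
    (hlast : 2 ≤ start → pos.getD (pos.length - 1) 0 ∉ d0.keys) :
    ∀ (m : Nat), ∀ (i fuel : Nat), start - i ≤ m → 1 ≤ i → i ≤ start → pos.length - i < fuel →
    pvALoop pos (L : Int) i fuel d0 = pvALoop pos (L : Int) start (fuel - (start - i)) d0 := by
  intro m
  induction m with
  | zero =>
    intro i fuel hm h1 h2 hf
    have : i = start := by omega
    subst this
    simp
  | succ m ihm =>
    intro i fuel hm h1 h2 hf
    by_cases hie : i = start
    · subst hie; simp
    · have hlt : i < start := by omega
      have hstart2 : 2 ≤ start := by omega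
      have hin : i < pos.length := by omega
      obtain ⟨f, rfl⟩ : ∃ f, fuel = f + 1 := ⟨fuel - 1, by omega⟩
      -- the greatest index whose key is numbered
      have hexk : ∃ k, k ≤ pos.length - 1 ∧ pos.getD k 0 ∈ d0.keys ∧
          ∀ j, k < j → j < pos.length → pos.getD j 0 ∉ d0.keys := by
        classical
        refine ⟨Nat.findGreatest (fun j => pos.getD j 0 ∈ d0.keys) (pos.length - 1),
          Nat.findGreatest_le _, ?_, ?_⟩
        · exact Nat.findGreatest_spec (P := fun j => pos.getD j 0 ∈ d0.keys)
            (m := start) (by omega) hsmem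
        · intro j hj1 hj2
          exact Nat.findGreatest_is_greatest hj1 (by omega)
      obtain ⟨k, hk1, hk2, hk3⟩ := hexk
      have hklast : k + 1 < pos.length := by
        rcases Nat.lt_or_ge (k + 1) pos.length with h | h
        · exact h
        · exfalso
          have hke : k = pos.length - 1 := by omega
          rw [hke] at hk2
          exact hlast hstart2 hk2
      have hrk : start ≤ k := by
        by_contra hc
        exact hk3 start (by omega) (by omega) hsmem
      rw [pvALoop_step pos (L : Int) i f d0 hin (by push_cast; omega)]
      rw [pvAStep_wrap pos d0 i start k h1 hlt (by omega)
        (fun j hj1 hj2 => hsmin j (by omega)) (fun j hj1 hj2 => hsmin j hj2) hsmem hk2 hk3 hklast hrk]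
      have := ihm (i + 1) f (by omega) (by omega) (by omega) (by omega)
      rw [this]
      congr 1
      omega

theorem pv_main_equiv (numbering_dict : List (Int × Int × String)) (sequence_list : List (Int × String))
    (hpre : Pre_cleanup_scTCR_numbering numbering_dict sequence_list)
    (hnd : ¬ D_cleanup_scTCR_numbering numbering_dict sequence_list) :
    cleanup_scTCR_numbering numbering_dict sequence_list = cleanup_scTCR_numbering_alt numbering_dict sequence_list := by
  obtain ⟨hne, hmax, _⟩ := hpre
  set pos : List Int := sequence_list.map Prod.fst with hposdef
  set d0 : PySem.Dict Int (Int × String) := PySem.Dict.ofList numbering_dict with hd0def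
  have hkeys : d0.keys = PySem.Set.ofList (numbering_dict.map Prod.fst) := by
    rw [hd0def,
      show PySem.Dict.ofList numbering_dict
        = numbering_dict.foldl (fun d p => d.insert p.1 p.2) PySem.Dict.empty from rfl,
      PySem.Dict.keys_foldl_insert_key]
    simp [PySem.Set.update_nil_left]
  have hmemk : ∀ x, x ∈ d0.keys ↔ x ∈ numbering_dict.map Prod.fst := by
    intro x; rw [hkeys]; exact PySem.Set.mem_ofList _ _
  have hrawne : numbering_dict.map Prod.fst ≠ [] := by simpa using hne
  have hkne : d0.keys ≠ [] := by
    intro h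
    rcases numbering_dict with _ | ⟨p, rest⟩
    · exact hne rfl
    · have : p.1 ∈ d0.keys := (hmemk p.1).2 (by simp)
      rw [h] at this
      simp at this
  obtain ⟨lk, hlk⟩ : ∃ lk, PySem.List.max? d0.keys (fun k => k) = some lk := by
    cases h : PySem.List.max? d0.keys (fun k => k)
    · exact absurd ((PySem.List.max?_eq_none_iff _ _).1 h) hkne
    · exact ⟨_, rfl⟩
  have hlkmem : lk ∈ d0.keys := PySem.List.max?_mem hlk
  obtain ⟨lkr, hlkr⟩ : ∃ lkr, PySem.List.max? (numbering_dict.map Prod.fst) (fun k => k) = some lkr := by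
    cases h : PySem.List.max? (numbering_dict.map Prod.fst) (fun k => k)
    · exact absurd ((PySem.List.max?_eq_none_iff _ _).1 h) hrawne
    · exact ⟨_, rfl⟩
  -- the dict's key list and the raw key list have the same elements, hence the same maximum
  have hlke : lk = lkr := by
    have h1 : lk ≤ lkr := PySem.List.max?_isMax hlkr lk ((hmemk lk).1 hlkmem)
    have h2 : lkr ≤ lk := PySem.List.max?_isMax hlk lkr ((hmemk lkr).2 (PySem.List.max?_mem hlkr))
    omega
  have hlkpos : lk ∈ pos := by
    rw [hlke]
    simpa [hlkr] using hmax
  obtain ⟨L, hL⟩ : ∃ L, PySem.List.index? pos lk = some L := by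
    cases h : PySem.List.index? pos lk
    · exact absurd ((PySem.List.index?_eq_none_iff _ _).1 h) (by simpa using hlkpos)
    · exact ⟨_, rfl⟩
  obtain ⟨hLn, hLe, hLmin⟩ := PySem.List.getElem_of_index?_eq_some hL
  have hL0 : pos.getD L 0 ∈ d0.keys := by
    rw [pv_getD_nat pos L hLn, hLe]; exact hlkmem
  have hn1 : 0 < pos.length := List.length_pos_iff.2 (List.ne_nil_of_mem hlkpos)
  -- the first numbered index
  have hexs : ∃ j, pos.getD j 0 ∈ d0.keys := ⟨L, hL0⟩
  classical
  set start := Nat.find hexs with hstartdef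
  have hsmem : pos.getD start 0 ∈ d0.keys := Nat.find_spec hexs
  have hsmin : ∀ j, j < start → pos.getD j 0 ∉ d0.keys := fun j hj => Nat.find_min hexs hj
  have hstartL : start ≤ L := Nat.find_min' hexs hL0
  have hstartn : start < pos.length := by omega
  -- unfold both programs
  simp only [cleanup_scTCR_numbering, cleanup_scTCR_numbering_alt]
  rw [← hposdef, ← hd0def, hlk]
  simp only [Option.getD_some]
  rw [hL]
  have hscan : pvBStartScan d0 pos 0 (pos.length + 1) = start := by
    apply pvBStartScan_spec d0 pos (pos.length + 1) 0 start (pos.getD start 0) (by omega) ?_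
      (pv_pyGet?_nat pos start hstartn) ((PySem.Dict.contains_iff_mem_keys d0 _).2 hsmem) (by omega)
    intro t _ ht
    refine ⟨pos.getD t 0, pv_pyGet?_nat pos t (by omega), ?_⟩
    cases h : d0.contains (pos.getD t 0)
    · rfl
    · exact absurd ((PySem.Dict.contains_iff_mem_keys d0 _).1 h) (hsmin t ht)
  rw [hscan, pv_pyGet?_nat pos start hstartn]
  show (pvALoop pos (L : Int) 1 pos.length d0).items
      = (pvBLoop pos d0 ((d0.getD (pos.getD start 0) (0, " ")).1) []
          (PySem.List.pyRange ((start : Int) + 1) ((L : Int) + 1) 1)).items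
  congr 1
  by_cases hs0 : start = 0
  · rw [hs0]
    rw [show ((0 : Nat) : Int) + 1 = ((1 : Nat) : Int) by norm_num]
    apply pvMain pos L 0 hLn (L + 1) 1 d0 _ pos.length
      (by omega) (by omega) (by omega) (by omega)
    · intro j hj1 hj2
      have hj : j = 0 := by omega
      rw [hj]
      rw [hs0] at hsmem
      exact hsmem
    · exact hL0
    · simp
  · have hs1 : 1 ≤ start := by omega
    have hlast : 2 ≤ start → pos.getD (pos.length - 1) 0 ∉ d0.keys := by
      intro h2 hmem
      apply hnd
      have hlen : pos.length = sequence_list.length := by rw [hposdef, List.length_map]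
      refine ⟨by omega, ?_, ?_, ?_⟩
      · rw [← hposdef]
        exact fun h => hsmin 0 (by omega) ((hmemk _).2 h)
      · rw [← hposdef]
        exact fun h => hsmin 1 (by omega) ((hmemk _).2 h)
      · rw [← hposdef, ← hlen]
        exact (hmemk _).1 hmem
    -- phase 1: indices 1 … start-1 leave the dict unchanged
    rw [pvPhase1 pos d0 L start hLn hstartL hsmin hsmem hlast start 1 pos.length
      (by omega) le_rfl hs1 (by omega)]
    obtain ⟨f, hf⟩ : ∃ f, pos.length - (start - 1) = f + 1 := ⟨pos.length - start, by omega⟩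
    rw [hf, pvALoop_step pos (L : Int) start f d0 hstartn (by push_cast; omega),
      pvAStep_skip pos d0 start hstartn hsmem]
    rw [show ((start : Int) + 1) = (((start + 1 : Nat)) : Int) by push_cast; ring]
    apply pvMain pos L start hLn (L + 1) (start + 1) d0 _ f
      (by omega) (by omega) (by omega) (by omega)
    · intro j hj1 hj2
      have hj : j = start := by omega
      rw [hj]
      exact hsmem
    · exact hL0
    · simp


-- ===== tightness: inside D_ the two programs always differ =====

-- any step of A only adds keys
theorem pvAStep_mem_mono (pos : List Int) (d : PySem.Dict Int (Int × String)) (i : Nat) (q : Int)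
    (h : q ∈ d.keys) : q ∈ (pvAStep pos d i).keys := by
  unfold pvAStep
  split
  · exact h
  · split_ifs with hc
    · exact h
    · split
      · rw [pvAFill_mem_keys]; exact Or.inl h
      · exact h

theorem pvALoop_mem_mono (pos : List Int) (L : Int) :
    ∀ (fuel i : Nat) (d : PySem.Dict Int (Int × String)) (q : Int),
    q ∈ d.keys → q ∈ (pvALoop pos L i fuel d).keys := by
  intro fuel
  induction fuel with
  | zero => intro i d q h; exact h
  | succ f ih =>
    intro i d q h
    simp only [pvALoop]
    split_ifs
    · exact h
    · exact ih (i + 1) _ q (pvAStep_mem_mono pos d i q h)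
    · exact h

-- every key of B's loop result comes from the input dict, the pending gap, or a visited index
theorem pvBLoop_mem (pos : List Int) :
    ∀ (idxs : List Int) (d : PySem.Dict Int (Int × String)) (lN : Int) (gap : List Int) (q : Int),
    q ∈ (pvBLoop pos d lN gap idxs).keys →
    q ∈ d.keys ∨ q ∈ gap ∨ ∃ i ∈ idxs, PySem.List.pyGet? pos i = some q := by
  intro idxs
  induction idxs with
  | nil => intro d lN gap q h; exact Or.inl h
  | cons i rest ih =>
    intro d lN gap q h
    rw [pvBLoop] at h
    revert h
    cases hg : PySem.List.pyGet? pos i with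
    | none => exact fun h => Or.inl h
    | some key =>
      by_cases hc : d.contains key
      · simp only [hc, if_true]
        intro h
        rcases ih _ _ _ q h with h1 | h2 | ⟨j, hj, hjq⟩
        · rw [show pvBFill d lN gap = pvAFill d lN gap from rfl, pvAFill_mem_keys] at h1
          rcases h1 with h1 | h1
          · exact Or.inl h1
          · exact Or.inr (Or.inl h1)
        · exact absurd h2 (List.not_mem_nil)
        · exact Or.inr (Or.inr ⟨j, List.mem_cons_of_mem i hj, hjq⟩)
      · simp only [hc, Bool.false_eq_true, if_false]
        intro h
        rcases ih _ _ _ q h with h1 | h2 | ⟨j, hj, hjq⟩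
        · exact Or.inl h1
        · rcases List.mem_append.1 h2 with h2 | h2
          · exact Or.inr (Or.inl h2)
          · have hqk : q = key := by simpa using h2
            exact Or.inr (Or.inr ⟨i, List.mem_cons_self, by rw [hg, hqk]⟩)
        · exact Or.inr (Or.inr ⟨j, List.mem_cons_of_mem i hj, hjq⟩)

-- A's body at index 1 when the whole prefix up to the gap is unnumbered but the
-- last position is numbered: the left scan wraps to -1 and the gap [0:r] is filled
theorem pvAStep_wrapfill (pos : List Int) (d : PySem.Dict Int (Int × String)) (r : Nat)
    (hr2 : 2 ≤ r) (hrn : r < pos.length)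
    (h0 : pos.getD 0 0 ∉ d.keys)
    (hmiss : ∀ j, 1 ≤ j → j < r → pos.getD j 0 ∉ d.keys)
    (hrmem : pos.getD r 0 ∈ d.keys)
    (v : Int × String) (hv : d.get? (pos.getD (pos.length - 1) 0) = some v) :
    pvAStep pos d 1 = pvAFill d v.1 (pos.take r) := by
  have hn : 2 < pos.length := by omega
  have hg1 : PySem.List.pyGet? pos ((1 : Nat) : Int) = some (pos.getD 1 0) :=
    pv_pyGet?_nat pos 1 (by omega)
  have hcf : d.contains (pos.getD 1 0) = false := by
    cases h : d.contains (pos.getD 1 0)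
    · rfl
    · exact absurd ((PySem.Dict.contains_iff_mem_keys d _).1 h) (hmiss 1 le_rfl (by omega))
  have hghit : PySem.List.pyGet? pos (((1 : Nat) : Int) - 2) = some (pos.getD (pos.length - 1) 0) := by
    have he : ((1 : Nat) : Int) - 2 = -((1 : Nat) : Int) := by norm_num
    rw [he, PySem.List.pyGet?_neg_natCast pos 1 (by omega) (by omega),
      List.getElem?_eq_getElem (by omega), pv_getD_nat pos _ (by omega)]
  have hleft : pvALeftScan d pos ((1 : Nat) : Int) 0 (2 * pos.length + 2)
      = some (((1 : Nat) : Int) - 2, v) := by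
    apply pvALeftScan_spec d pos _ _ 0 2 (pos.getD (pos.length - 1) 0) v (by omega) ?_ hghit hv (by omega)
    intro j' hj1 hj2
    have hj : j' = 0 ∨ j' = 1 := by omega
    rcases hj with hj | hj <;> subst hj
    · refine ⟨pos.getD 1 0, by simpa using hg1, ?_⟩
      rw [PySem.Dict.get?_eq_none_iff_not_mem_keys]
      exact hmiss 1 le_rfl (by omega)
    · refine ⟨pos.getD 0 0, ?_, ?_⟩
      · have he : ((1 : Nat) : Int) - 1 = ((0 : Nat) : Int) := by norm_num
        rw [he]; exact pv_pyGet?_nat pos 0 (by omega)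
      · rw [PySem.Dict.get?_eq_none_iff_not_mem_keys]
        exact h0
  have hgr : PySem.List.pyGet? pos (((1 : Nat) : Int) + ((r - 1 : Nat) : Int)) = some (pos.getD r 0) := by
    have he : ((1 : Nat) : Int) + ((r - 1 : Nat) : Int) = ((r : Nat) : Int) := by omega
    rw [he]; exact pv_pyGet?_nat pos r hrn
  have hright : pvARightScan d pos ((1 : Nat) : Int) 0 (pos.length + 1)
      = some (((1 : Nat) : Int) + ((r - 1 : Nat) : Int)) := by
    apply pvARightScan_spec d pos _ _ 0 ((r - 1 : Nat) : Int) (pos.getD r 0) (by omega) ?_ hgr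
      ((PySem.Dict.contains_iff_mem_keys d _).2 hrmem) (by omega)
    intro j' hj1 hj2
    have hj : 1 + j'.toNat < r := by omega
    have he : ((1 : Nat) : Int) + j' = ((1 + j'.toNat : Nat) : Int) := by omega
    refine ⟨pos.getD (1 + j'.toNat) 0, by rw [he]; exact pv_pyGet?_nat pos _ (by omega), ?_⟩
    cases h : d.contains (pos.getD (1 + j'.toNat) 0)
    · rfl
    · exact absurd ((PySem.Dict.contains_iff_mem_keys d _).1 h) (hmiss _ (by omega) hj)
  show pvAStep pos d 1 = _
  simp only [pvAStep, show ((1 : Nat) : Int) = (1 : Int) from rfl] at *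
  simp only [pvAStep, hg1, hcf, Bool.false_eq_true, if_false, hleft, hright]
  have he1 : (1 : Int) - 2 + 1 = ((0 : Nat) : Int) := by norm_num
  have he2 : (1 : Int) + ((r - 1 : Nat) : Int) = ((r : Nat) : Int) := by omega
  rw [he1, he2, PySem.List.slice_natCast]
  simp

theorem pv_tight (numbering_dict : List (Int × Int × String)) (sequence_list : List (Int × String))
    (hpre : Pre_cleanup_scTCR_numbering numbering_dict sequence_list)
    (hd : D_cleanup_scTCR_numbering numbering_dict sequence_list) :
    cleanup_scTCR_numbering numbering_dict sequence_list ≠ cleanup_scTCR_numbering_alt numbering_dict sequence_list := by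
  obtain ⟨hne, hmax, hpd⟩ := hpre
  have hnodup : (sequence_list.map Prod.fst).Nodup := hpd hd
  obtain ⟨hlen2, h0raw, h1raw, hlraw⟩ := hd
  set pos : List Int := sequence_list.map Prod.fst with hposdef
  set d0 : PySem.Dict Int (Int × String) := PySem.Dict.ofList numbering_dict with hd0def
  have hkeys : d0.keys = PySem.Set.ofList (numbering_dict.map Prod.fst) := by
    rw [hd0def,
      show PySem.Dict.ofList numbering_dict
        = numbering_dict.foldl (fun d p => d.insert p.1 p.2) PySem.Dict.empty from rfl,
      PySem.Dict.keys_foldl_insert_key]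
    simp [PySem.Set.update_nil_left]
  have hmemk : ∀ x, x ∈ d0.keys ↔ x ∈ numbering_dict.map Prod.fst := by
    intro x; rw [hkeys]; exact PySem.Set.mem_ofList _ _
  have hlen : pos.length = sequence_list.length := by rw [hposdef, List.length_map]
  have h0 : pos.getD 0 0 ∉ d0.keys := fun h => h0raw ((hmemk _).1 h)
  have h1 : pos.getD 1 0 ∉ d0.keys := fun h => h1raw ((hmemk _).1 h)
  have hlastmem : pos.getD (pos.length - 1) 0 ∈ d0.keys := by
    rw [hlen]; exact (hmemk _).2 hlraw
  have hrawne : numbering_dict.map Prod.fst ≠ [] := by simpa using hne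
  have hkne : d0.keys ≠ [] := by
    intro h
    rcases numbering_dict with _ | ⟨p, rest⟩
    · exact hne rfl
    · have : p.1 ∈ d0.keys := (hmemk p.1).2 (by simp)
      rw [h] at this
      simp at this
  obtain ⟨lk, hlk⟩ : ∃ lk, PySem.List.max? d0.keys (fun k => k) = some lk := by
    cases h : PySem.List.max? d0.keys (fun k => k)
    · exact absurd ((PySem.List.max?_eq_none_iff _ _).1 h) hkne
    · exact ⟨_, rfl⟩
  have hlkmem : lk ∈ d0.keys := PySem.List.max?_mem hlk
  obtain ⟨lkr, hlkr⟩ : ∃ lkr, PySem.List.max? (numbering_dict.map Prod.fst) (fun k => k) = some lkr := by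
    cases h : PySem.List.max? (numbering_dict.map Prod.fst) (fun k => k)
    · exact absurd ((PySem.List.max?_eq_none_iff _ _).1 h) hrawne
    · exact ⟨_, rfl⟩
  have hlke : lk = lkr := by
    have hle1 : lk ≤ lkr := PySem.List.max?_isMax hlkr lk ((hmemk lk).1 hlkmem)
    have hle2 : lkr ≤ lk := PySem.List.max?_isMax hlk lkr ((hmemk lkr).2 (PySem.List.max?_mem hlkr))
    omega
  have hlkpos : lk ∈ pos := by
    rw [hlke]
    simpa [hlkr] using hmax
  obtain ⟨L, hL⟩ : ∃ L, PySem.List.index? pos lk = some L := by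
    cases h : PySem.List.index? pos lk
    · exact absurd ((PySem.List.index?_eq_none_iff _ _).1 h) (by simpa using hlkpos)
    · exact ⟨_, rfl⟩
  obtain ⟨hLn, hLe, hLmin⟩ := PySem.List.getElem_of_index?_eq_some hL
  have hL0 : pos.getD L 0 ∈ d0.keys := by
    rw [pv_getD_nat pos L hLn, hLe]; exact hlkmem
  have hn2 : 2 ≤ pos.length := by omega
  have hL1 : 1 ≤ L := by
    by_contra hc
    have hLz : L = 0 := by omega
    apply h0
    rw [← hLz]
    exact hL0
  -- the first numbered index
  have hexs : ∃ j, pos.getD j 0 ∈ d0.keys := ⟨L, hL0⟩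
  classical
  set start := Nat.find hexs with hstartdef
  have hsmem : pos.getD start 0 ∈ d0.keys := Nat.find_spec hexs
  have hsmin : ∀ j, j < start → pos.getD j 0 ∉ d0.keys := fun j hj => Nat.find_min hexs hj
  have hstartL : start ≤ L := Nat.find_min' hexs hL0
  have hstartn : start < pos.length := by omega
  have hstart2 : 2 ≤ start := by
    by_contra hc
    interval_cases start
    · exact h0 hsmem
    · exact h1 hsmem
  -- unfold both programs
  simp only [cleanup_scTCR_numbering, cleanup_scTCR_numbering_alt]
  rw [← hposdef, ← hd0def, hlk]
  simp only [Option.getD_some]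
  rw [hL]
  have hscan : pvBStartScan d0 pos 0 (pos.length + 1) = start := by
    apply pvBStartScan_spec d0 pos (pos.length + 1) 0 start (pos.getD start 0) (by omega) ?_
      (pv_pyGet?_nat pos start hstartn) ((PySem.Dict.contains_iff_mem_keys d0 _).2 hsmem) (by omega)
    intro t _ ht
    refine ⟨pos.getD t 0, pv_pyGet?_nat pos t (by omega), ?_⟩
    cases h : d0.contains (pos.getD t 0)
    · rfl
    · exact absurd ((PySem.Dict.contains_iff_mem_keys d0 _).1 h) (hsmin t ht)
  rw [hscan, pv_pyGet?_nat pos start hstartn]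
  show (pvALoop pos (L : Int) 1 pos.length d0).items
      ≠ (pvBLoop pos d0 ((d0.getD (pos.getD start 0) (0, " ")).1) []
          (PySem.List.pyRange ((start : Int) + 1) ((L : Int) + 1) 1)).items
  intro heq
  -- A's first iteration wrap-fills the leading gap, so pos[0]'s key ends up in A's dict
  have hvex : ∃ v, d0.get? (pos.getD (pos.length - 1) 0) = some v := by
    have := (PySem.Dict.contains_iff_mem_keys d0 _).2 hlastmem
    rw [PySem.Dict.contains_eq_isSome_get?] at this
    exact Option.isSome_iff_exists.1 this
  obtain ⟨v, hv⟩ := hvex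
  obtain ⟨f, hf⟩ : ∃ f, pos.length = f + 1 := ⟨pos.length - 1, by omega⟩
  have hmemA : pos.getD 0 0 ∈ (pvALoop pos (L : Int) 1 pos.length d0).keys := by
    rw [hf, pvALoop_step pos (L : Int) 1 f d0 (by omega) (by push_cast; omega)]
    apply pvALoop_mem_mono
    rw [pvAStep_wrapfill pos d0 start hstart2 hstartn h0
      (fun j hj1 hj2 => hsmin j hj2) hsmem v hv]
    rw [pvAFill_mem_keys]
    refine Or.inr ?_
    rw [List.mem_iff_getElem]
    refine ⟨0, by simp [List.length_take]; omega, ?_⟩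
    rw [List.getElem_take, pv_getD_nat pos 0 (by omega)]
  -- B never touches pos[0]'s key
  have hmemB : pos.getD 0 0 ∉ (pvBLoop pos d0 ((d0.getD (pos.getD start 0) (0, " ")).1) []
      (PySem.List.pyRange ((start : Int) + 1) ((L : Int) + 1) 1)).keys := by
    intro hmem
    rcases pvBLoop_mem pos _ _ _ _ _ hmem with h | h | ⟨i, hi, hiq⟩
    · exact h0 h
    · simp at h
    · rw [PySem.List.mem_pyRange_one] at hi
      have hipos : 0 ≤ i := by omega
      rw [PySem.List.pyGet?_of_nonneg pos hipos] at hiq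
      have hitn : i.toNat < pos.length := by
        by_contra hc
        rw [List.getElem?_eq_none (by omega)] at hiq
        simp at hiq
      rw [List.getElem?_eq_getElem hitn] at hiq
      have heq0 : pos[i.toNat] = pos[0] := by
        have := Option.some.inj hiq
        rw [this, pv_getD_nat pos 0 (by omega)]
      have := (List.Nodup.getElem_inj_iff hnodup).1 heq0
      omega
  -- but the two returned item lists are claimed equal
  apply hmemB
  have hkeq : (pvALoop pos (L : Int) 1 pos.length d0).keys
      = (pvBLoop pos d0 ((d0.getD (pos.getD start 0) (0, " ")).1) []
          (PySem.List.pyRange ((start : Int) + 1) ((L : Int) + 1) 1)).keys := by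
    simp only [PySem.Dict.keys]
    rw [heq]
  rw [← hkeq]
  exact hmemA

-- ===== VERDICT =====
theorem cleanup_scTCR_numbering_spec : Claim_unchanged_cleanup_scTCR_numbering := by
  intro nd sl _ hpre hnd
  exact pv_main_equiv nd sl hpre hnd

theorem cleanup_scTCR_numbering_changed : Claim_changed_cleanup_scTCR_numbering := by
  unfold Claim_changed_cleanup_scTCR_numbering; decide

theorem cleanup_scTCR_numbering_tight : Claim_exact_cleanup_scTCR_numbering := by
  intro nd sl _ hpre hd
  exact pv_tight nd sl hpre hd
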